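-- pv_equiv track=rewrite | github.com/OneRite/Python | laba№4/task4.py | count
-- ===== SOURCE A (Python) =====
-- def count(text):
--     word_counts = {}  # Создаем пустой словарь для подсчета встреч слов
--
--     # Разбиваем строку на слова и проходим по каждому слову
--     words = text.split()
--     result = []
--     for word in words:
--         # Если слово уже встречалось ранее, выводим количество вхождений
--         if word in word_counts:
--             result.append(str(word_counts[word]))
--         else:
--             result.append('0')
--
--         # Увеличиваем количество вхождений слова в словаре
--         if word in word_counts:
--             word_counts[word] += 1
--         else:
--             word_counts[word] = 1
--
--     return ' '.join(result)  # Возвращаем результат в виде строки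
-- ===== SOURCE B (Python) =====
-- def count(text):
--     words = text.split()
--     return ' '.join(str(words[:i].count(w)) for i, w in enumerate(words))
-- ===== Notes on version B (the rewrite author's own statement) =====
-- stated objective: simpler
-- what changed: Replaced the running word_counts dict and its two membership branches with a one-line prefix re-scan: for each position i the output is words[:i].count(words[i]).
import Mathlib
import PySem

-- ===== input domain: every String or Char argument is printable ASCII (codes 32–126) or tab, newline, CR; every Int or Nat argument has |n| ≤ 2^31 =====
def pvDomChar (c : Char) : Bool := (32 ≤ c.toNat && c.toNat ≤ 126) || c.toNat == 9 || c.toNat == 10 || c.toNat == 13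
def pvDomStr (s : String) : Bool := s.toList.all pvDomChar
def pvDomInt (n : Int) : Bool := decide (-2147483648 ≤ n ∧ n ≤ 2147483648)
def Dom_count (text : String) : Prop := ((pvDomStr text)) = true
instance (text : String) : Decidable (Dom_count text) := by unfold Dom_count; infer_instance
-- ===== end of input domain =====

-- B replaces A's running word_counts dict with a one-line prefix re-scan (simpler, not faster).

-- ===== PORT A =====
def countStep (st : PySem.Dict String Int × List String) (word : String) :
    PySem.Dict String Int × List String :=
  let res := if st.1.contains word then st.2 ++ [PySem.Int.toStr (st.1.getD word 0)]
             else st.2 ++ ["0"]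
  let wc := if st.1.contains word then st.1.insert word (st.1.getD word 0 + 1)
            else st.1.insert word 1
  (wc, res)

def count (text : String) : String :=
  let words := PySem.Str.split₀ text
  PySem.Str.join " " ((words.foldl countStep ((PySem.Dict.empty : PySem.Dict String Int), [])).2)

-- ===== PORT B =====
def count_alt (text : String) : String :=
  let words := PySem.Str.split₀ text
  PySem.Str.join " " ((PySem.List.enumerate words 0).map
    (fun p => PySem.Int.toStr (((PySem.List.slice words none (some p.1)).count p.2 : Nat) : Int)))

-- ===== PRECONDITION & SPEC =====
def Spec_count (text : String) (out : String) : Prop := out = count_alt text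
instance (text : String) (out : String) : Decidable (Spec_count text out) := by unfold Spec_count; infer_instance

-- ===== CLAIM (what is proved, stated in full; the proofs are below) =====
def Claim_equal_count : Prop := ∀ (text : String), Dom_count text → Spec_count text (count text)

-- ===== LEMMAS AND PROOFS =====

-- A's dict component is exactly the running Counter of the processed words.
theorem dict_eq (ws : List String) (d : PySem.Dict String Int) (r : List String) :
    (ws.foldl countStep (d, r)).1
      = ws.foldl (fun d x => d.insert x (d.getD x 0 + 1)) d := by
  induction ws generalizing d r with
  | nil => rfl
  | cons w ws ih =>
    simp only [List.foldl_cons]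
    rw [ih]
    unfold countStep
    by_cases h : d.contains w = true
    · simp [h]
    · simp only [Bool.not_eq_true] at h
      simp [h, PySem.Dict.getD_of_not_contains d 0 h]

theorem dict_eq_counter (ws : List String) :
    (ws.foldl countStep ((PySem.Dict.empty : PySem.Dict String Int), [])).1
      = PySem.Dict.counter ws := by
  rw [dict_eq, PySem.Dict.foldl_insert_getD_add_one_eq_counter]

theorem result_eq (ws : List String) :
    (ws.foldl countStep ((PySem.Dict.empty : PySem.Dict String Int), [])).2
      = (PySem.List.enumerate ws 0).map
          (fun p => PySem.Int.toStr (((PySem.List.slice ws none (some p.1)).count p.2 : Nat) : Int)) := by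
  induction ws using List.reverseRecOn with
  | nil => rfl
  | append_singleton ws w ih =>
    rw [List.foldl_append, PySem.List.enumerate_append, List.map_append]
    have hlast : (PySem.List.enumerate [w] (0 + (ws.length : Int))).map
        (fun p => PySem.Int.toStr (((PySem.List.slice (ws ++ [w]) none (some p.1)).count p.2 : Nat) : Int))
        = [PySem.Int.toStr ((ws.count w : Nat) : Int)] := by
      show [PySem.Int.toStr _] = _
      have : ((0 : Int) + (ws.length : Int)) = ((ws.length : Nat) : Int) := by ring
      rw [this, PySem.List.slice_to_natCast, List.take_left]
    have hpre : (PySem.List.enumerate ws 0).map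
        (fun p => PySem.Int.toStr (((PySem.List.slice (ws ++ [w]) none (some p.1)).count p.2 : Nat) : Int))
        = (PySem.List.enumerate ws 0).map
          (fun p => PySem.Int.toStr (((PySem.List.slice ws none (some p.1)).count p.2 : Nat) : Int)) := by
      apply List.map_congr_left
      intro p hp
      obtain ⟨k, hk, rfl⟩ := (PySem.List.mem_enumerate_iff ws 0 p).mp hp
      have h0 : ((0 : Int) + (k : Int)) = ((k : Nat) : Int) := by ring
      simp only [h0, PySem.List.slice_to_natCast,
        List.take_append_of_le_length (Nat.le_of_lt hk)]
    -- the left fold step on the result component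
    have hsnd : ∀ (st : PySem.Dict String Int × List String) (v : String),
        (countStep st v).2 = if st.1.contains v = true then st.2 ++ [PySem.Int.toStr (st.1.getD v 0)]
                             else st.2 ++ ["0"] := fun _ _ => rfl
    have hstep : (countStep (ws.foldl countStep ((PySem.Dict.empty : PySem.Dict String Int), [])) w).2
        = (ws.foldl countStep ((PySem.Dict.empty : PySem.Dict String Int), [])).2
          ++ [PySem.Int.toStr ((ws.count w : Nat) : Int)] := by
      rw [hsnd, dict_eq_counter ws, PySem.Dict.contains_counter, PySem.Dict.getD_counter]
      by_cases hw : w ∈ ws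
      · simp [hw]
      · have hc : List.count w ws = 0 := List.count_eq_zero.mpr hw
        simp [hw, hc]
        decide
    simp only [List.foldl_cons, List.foldl_nil]
    rw [hstep, hlast, hpre, ih]

-- ===== VERDICT (by name: the statement is the Claim_ definition above) =====
theorem count_spec : Claim_equal_count := by
  intro text _
  unfold Spec_count count count_alt
  simp only [result_eq]
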